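-- pv_equiv track=rewrite | github.com/0xhackit/fintechnewsbot | api/main.py | categorize_item
-- ===== SOURCE A (Python) =====
-- from typing import List, Optional
--
-- def categorize_item(item: dict) -> List[str]:
--     """
--     Derive categories from matched topics and keywords.
--     Maps topics to clean category labels.
--     """
--     categories = set()
--
--     # Map topics to category labels
--     topic_map = {
--         "Stablecoin adoption": "Stablecoins",
--         "Tokenized funds & RWA": "RWA",
--         "Crypto-native fintech launches": "Fintech",
--     }
--
--     for topic in item.get("matched_topics", []):
--         if topic in topic_map:
--             categories.add(topic_map[topic])
--
--     # Add keyword-based categories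
--     keywords = [kw.lower() for kw in item.get("matched_keywords", [])]
--
--     if any(kw in keywords for kw in ["tokenization", "tokenized", "rwa"]):
--         categories.add("Tokenization")
--
--     if any(kw in keywords for kw in ["stablecoin", "usdc", "usdt", "tether", "circle"]):
--         categories.add("Stablecoins")
--
--     if any(kw in keywords for kw in ["funding", "raises", "series a", "series b"]):
--         categories.add("Funding")
--
--     # Regulation category for regulatory news
--     if any(kw in keywords for kw in ["mica", "genius", "stablecoin bill", "regulation", "regulatory", "sec", "cftc", "compliance"]):
--         categories.add("Regulation")
--
--     # No default category - items without matches won't be shown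
--
--     return sorted(list(categories))
-- ===== SOURCE B (Python) =====
-- from typing import List
--
-- def categorize_item(item: dict) -> List[str]:
--     """Emit category labels directly in alphabetical order: one membership
--     test per label, no intermediate set and no final sort."""
--     topics = item.get("matched_topics", [])
--     kws = {kw.lower() for kw in item.get("matched_keywords", [])}
--     out = []
--     if "Crypto-native fintech launches" in topics:
--         out.append("Fintech")
--     if not kws.isdisjoint({"funding", "raises", "series a", "series b"}):
--         out.append("Funding")
--     if "Tokenized funds & RWA" in topics:
--         out.append("RWA")
--     if not kws.isdisjoint({"mica", "genius", "stablecoin bill", "regulation",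
--                            "regulatory", "sec", "cftc", "compliance"}):
--         out.append("Regulation")
--     if "Stablecoin adoption" in topics or not kws.isdisjoint(
--             {"stablecoin", "usdc", "usdt", "tether", "circle"}):
--         out.append("Stablecoins")
--     if not kws.isdisjoint({"tokenization", "tokenized", "rwa"}):
--         out.append("Tokenization")
--     return out
-- ===== Notes on version B (the rewrite author's own statement) =====
-- stated objective: simpler
-- what changed: B replaces A's collect-into-a-set-then-sort design (topic loop plus four per-category any() scans, then sorted()) by emitting each of the six possible labels directly in alphabetical order with one disjointness/membership test per label, so the intermediate set and the final sort disappear.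
import Mathlib
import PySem

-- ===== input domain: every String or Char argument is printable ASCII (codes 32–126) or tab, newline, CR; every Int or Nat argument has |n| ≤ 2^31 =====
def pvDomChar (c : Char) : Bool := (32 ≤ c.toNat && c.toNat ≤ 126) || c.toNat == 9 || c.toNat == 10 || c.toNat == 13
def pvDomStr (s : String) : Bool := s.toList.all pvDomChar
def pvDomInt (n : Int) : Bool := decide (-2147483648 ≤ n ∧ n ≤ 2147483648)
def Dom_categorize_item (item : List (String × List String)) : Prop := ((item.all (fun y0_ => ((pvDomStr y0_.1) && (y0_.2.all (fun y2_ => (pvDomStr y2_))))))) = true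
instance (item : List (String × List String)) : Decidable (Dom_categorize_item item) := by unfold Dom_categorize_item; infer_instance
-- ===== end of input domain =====

-- B emits the labels directly in alphabetical order (one membership test per label),
-- so the intermediate set and the final sort of A disappear; objective: simpler.

-- ===== PORT A =====
def categorize_item (item : List (String × List String)) : List String :=
  let categories : PySem.Set String := PySem.Set.empty
  let topic_map : PySem.Dict String String := PySem.Dict.mk
    [("Stablecoin adoption", "Stablecoins"),
     ("Tokenized funds & RWA", "RWA"),
     ("Crypto-native fintech launches", "Fintech")]
  let categories := ((PySem.Dict.mk item).getD "matched_topics" []).foldl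
    (fun s topic => if topic_map.contains topic then s.add (topic_map.getD topic "") else s)
    categories
  let keywords := ((PySem.Dict.mk item).getD "matched_keywords" []).map PySem.Str.lower
  let categories := if ["tokenization", "tokenized", "rwa"].any (fun kw => keywords.contains kw)
    then categories.add "Tokenization" else categories
  let categories := if ["stablecoin", "usdc", "usdt", "tether", "circle"].any (fun kw => keywords.contains kw)
    then categories.add "Stablecoins" else categories
  let categories := if ["funding", "raises", "series a", "series b"].any (fun kw => keywords.contains kw)
    then categories.add "Funding" else categories
  let categories := if ["mica", "genius", "stablecoin bill", "regulation", "regulatory", "sec", "cftc", "compliance"].any (fun kw => keywords.contains kw)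
    then categories.add "Regulation" else categories
  PySem.List.sorted categories (fun x => x)

-- ===== PORT B =====
def categorize_item_alt (item : List (String × List String)) : List String :=
  let topics := (PySem.Dict.mk item).getD "matched_topics" []
  let kws : PySem.Set String :=
    PySem.Set.ofList (((PySem.Dict.mk item).getD "matched_keywords" []).map PySem.Str.lower)
  let out : List String := []
  let out := if topics.contains "Crypto-native fintech launches" then out ++ ["Fintech"] else out
  let out := if !(kws.isdisjoint (PySem.Set.ofList ["funding", "raises", "series a", "series b"]))
    then out ++ ["Funding"] else out
  let out := if topics.contains "Tokenized funds & RWA" then out ++ ["RWA"] else out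
  let out := if !(kws.isdisjoint (PySem.Set.ofList ["mica", "genius", "stablecoin bill", "regulation", "regulatory", "sec", "cftc", "compliance"]))
    then out ++ ["Regulation"] else out
  let out := if topics.contains "Stablecoin adoption"
      || !(kws.isdisjoint (PySem.Set.ofList ["stablecoin", "usdc", "usdt", "tether", "circle"]))
    then out ++ ["Stablecoins"] else out
  let out := if !(kws.isdisjoint (PySem.Set.ofList ["tokenization", "tokenized", "rwa"]))
    then out ++ ["Tokenization"] else out
  out

-- ===== PRECONDITION & SPEC =====
def Spec_categorize_item (item : List (String × List String)) (out : List String) : Prop := out = categorize_item_alt item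
instance (item : List (String × List String)) (out : List String) : Decidable (Spec_categorize_item item out) := by unfold Spec_categorize_item; infer_instance

-- ===== CLAIM (what is proved, stated in full; the proofs are below) =====
def Claim_equal_categorize_item : Prop := ∀ (item : List (String × List String)), Dom_categorize_item item → Spec_categorize_item item (categorize_item item)

-- ===== LEMMAS AND PROOFS =====

-- B's if-append chain as a fold over (flag, label) pairs
def pvChain (start : List String) (l : List (Bool × String)) : List String :=
  l.foldl (fun acc p => if p.1 then acc ++ [p.2] else acc) start

lemma mem_pvChain (l : List (Bool × String)) (start : List String) (x : String) :
    x ∈ pvChain start l ↔ x ∈ start ∨ ∃ p ∈ l, p.1 = true ∧ x = p.2 := by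
  induction l generalizing start with
  | nil => simp [pvChain]
  | cons p t ih =>
    simp only [pvChain, List.foldl_cons] at *
    rw [ih]
    by_cases h : p.1 = true <;> simp [h] <;> tauto

lemma sublist_pvChain (l : List (Bool × String)) (start : List String) :
    (pvChain start l).Sublist (start ++ l.map (·.2)) := by
  induction l generalizing start with
  | nil => simp [pvChain]
  | cons p t ih =>
    simp only [pvChain, List.foldl_cons]
    by_cases h : p.1 = true <;> simp [h]
    · exact (ih (start ++ [p.2])).trans (by simp)
    · exact (ih start).trans (List.Sublist.append_left (List.sublist_cons_self p.2 (t.map (·.2))) start)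

lemma nodup_set_add (s : PySem.Set String) (x : String) (h : s.Nodup) : (s.add x).Nodup := by
  unfold PySem.Set.add
  split
  · exact h
  · rename_i hc
    simp [PySem.Set.contains] at hc
    simp only [List.nodup_append, h, true_and]
    constructor
    · exact List.nodup_singleton x
    · intro a ha b hb
      simp at hb
      subst hb
      exact fun e => hc (e ▸ ha)

def pvTM : PySem.Dict String String := PySem.Dict.mk
    [("Stablecoin adoption", "Stablecoins"),
     ("Tokenized funds & RWA", "RWA"),
     ("Crypto-native fintech launches", "Fintech")]

theorem flag_eq (keywords lits : List String) :
    (!(PySem.Set.isdisjoint (PySem.Set.ofList keywords) (PySem.Set.ofList lits)))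
      = lits.any (fun kw => keywords.contains kw) := by
  rw [Bool.eq_iff_iff, Bool.not_eq_true', Bool.eq_false_iff, Ne, PySem.Set.isdisjoint_iff]
  push Not
  simp only [PySem.Set.mem_ofList, List.any_eq_true, List.contains_iff_mem]
  constructor
  · rintro ⟨x, hx, hl⟩; exact ⟨x, hl, hx⟩
  · rintro ⟨x, hl, hx⟩; exact ⟨x, hx, hl⟩

theorem mem_topic_fold (topics : List String) (s : PySem.Set String) (x : String) :
    x ∈ topics.foldl (fun s topic => if pvTM.contains topic then s.add (pvTM.getD topic "") else s) s
      ↔ x ∈ s ∨ (x = "Stablecoins" ∧ "Stablecoin adoption" ∈ topics)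
            ∨ (x = "RWA" ∧ "Tokenized funds & RWA" ∈ topics)
            ∨ (x = "Fintech" ∧ "Crypto-native fintech launches" ∈ topics) := by
  induction topics generalizing s with
  | nil => simp
  | cons t ts ih =>
    simp only [List.foldl_cons]
    rw [ih]
    by_cases h1 : t = "Stablecoin adoption"
    · subst h1
      simp [pvTM, PySem.Dict.contains_mk, PySem.Dict.getD_eq_get?_getD, PySem.Dict.get?_mk_cons,
            PySem.Set.mem_add]
      tauto
    · by_cases h2 : t = "Tokenized funds & RWA"
      · subst h2
        simp [pvTM, PySem.Dict.contains_mk, PySem.Dict.getD_eq_get?_getD, PySem.Dict.get?_mk_cons,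
              PySem.Set.mem_add]
        tauto
      · by_cases h3 : t = "Crypto-native fintech launches"
        · subst h3
          simp [pvTM, PySem.Dict.contains_mk, PySem.Dict.getD_eq_get?_getD, PySem.Dict.get?_mk_cons,
                PySem.Set.mem_add]
          tauto
        · have hc : pvTM.contains t = false := by
            simp [pvTM, PySem.Dict.contains_mk]
            exact ⟨fun e => h1 e.symm, fun e => h2 e.symm, fun e => h3 e.symm⟩
          simp only [hc, Bool.false_eq_true, if_false, List.mem_cons]
          tauto

theorem nodup_topic_fold (topics : List String) (s : PySem.Set String) (h : s.Nodup) :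
    (topics.foldl (fun s topic => if pvTM.contains topic then s.add (pvTM.getD topic "") else s) s).Nodup := by
  induction topics generalizing s with
  | nil => exact h
  | cons t ts ih =>
    simp only [List.foldl_cons]
    apply ih
    split
    · exact nodup_set_add _ _ h
    · exact h

set_option maxHeartbeats 2000000 in
theorem pv_main (topics keywords : List String) :
    PySem.List.sorted
      (let categories : PySem.Set String := PySem.Set.empty
       let categories := topics.foldl
         (fun s topic => if pvTM.contains topic then s.add (pvTM.getD topic "") else s) categories
       let categories := if ["tokenization", "tokenized", "rwa"].any (fun kw => keywords.contains kw)
         then categories.add "Tokenization" else categories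
       let categories := if ["stablecoin", "usdc", "usdt", "tether", "circle"].any (fun kw => keywords.contains kw)
         then categories.add "Stablecoins" else categories
       let categories := if ["funding", "raises", "series a", "series b"].any (fun kw => keywords.contains kw)
         then categories.add "Funding" else categories
       let categories := if ["mica", "genius", "stablecoin bill", "regulation", "regulatory", "sec", "cftc", "compliance"].any (fun kw => keywords.contains kw)
         then categories.add "Regulation" else categories
       categories) (fun x => x)
    = pvChain []
       [(topics.contains "Crypto-native fintech launches", "Fintech"),
        (!(PySem.Set.isdisjoint (PySem.Set.ofList keywords) (PySem.Set.ofList ["funding", "raises", "series a", "series b"])), "Funding"),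
        (topics.contains "Tokenized funds & RWA", "RWA"),
        (!(PySem.Set.isdisjoint (PySem.Set.ofList keywords) (PySem.Set.ofList ["mica", "genius", "stablecoin bill", "regulation", "regulatory", "sec", "cftc", "compliance"])), "Regulation"),
        (topics.contains "Stablecoin adoption"
           || !(PySem.Set.isdisjoint (PySem.Set.ofList keywords) (PySem.Set.ofList ["stablecoin", "usdc", "usdt", "tether", "circle"])), "Stablecoins"),
        (!(PySem.Set.isdisjoint (PySem.Set.ofList keywords) (PySem.Set.ofList ["tokenization", "tokenized", "rwa"])), "Tokenization")] := by
  simp only [flag_eq]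
  have hcanon : (["Fintech","Funding","RWA","Regulation","Stablecoins","Tokenization"] : List String).Pairwise (fun a b => a < b) := by
    have h : ∀ a b : String, a.toList < b.toList → a < b := fun a b h => String.lt_iff_toList_lt.mpr h
    simp only [List.pairwise_cons, List.mem_cons, List.not_mem_nil]
    refine ⟨?_, ?_, ?_, ?_, ?_, ?_, List.Pairwise.nil⟩ <;> intro b hb <;>
      rcases hb with rfl|hb <;> try exact h _ _ (by decide)
    all_goals (rcases hb with rfl|hb <;> try exact h _ _ (by decide))
    all_goals (rcases hb with rfl|hb <;> try exact h _ _ (by decide))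
    all_goals (rcases hb with rfl|hb <;> try exact h _ _ (by decide))
    all_goals (rcases hb with rfl|hb <;> try exact h _ _ (by decide))
    all_goals exact hb.elim
  have hpair : (pvChain ([] : List String)
       [(topics.contains "Crypto-native fintech launches", "Fintech"),
        (["funding", "raises", "series a", "series b"].any (fun kw => keywords.contains kw), "Funding"),
        (topics.contains "Tokenized funds & RWA", "RWA"),
        (["mica", "genius", "stablecoin bill", "regulation", "regulatory", "sec", "cftc", "compliance"].any (fun kw => keywords.contains kw), "Regulation"),
        (topics.contains "Stablecoin adoption"
           || ["stablecoin", "usdc", "usdt", "tether", "circle"].any (fun kw => keywords.contains kw), "Stablecoins"),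
        (["tokenization", "tokenized", "rwa"].any (fun kw => keywords.contains kw), "Tokenization")]).Pairwise (fun a b => a < b) :=
    List.Pairwise.sublist (sublist_pvChain _ _) (by simpa using hcanon)
  apply PySem.List.sorted_eq_of_perm_of_pairwise_lt
  · rw [List.perm_ext_iff_of_nodup (hpair.imp fun h => ne_of_lt h) ?nodupA]
    case nodupA =>
      split_ifs <;>
        first
          | exact nodup_topic_fold _ _ (by simp [PySem.Set.empty])
          | (repeat' apply nodup_set_add) <;> exact nodup_topic_fold _ _ (by simp [PySem.Set.empty])
    intro x
    rw [mem_pvChain]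
    split_ifs <;>
      simp only [PySem.Set.mem_add, mem_topic_fold, PySem.Set.empty, List.not_mem_nil,
        List.exists_mem_cons_iff, false_and, exists_false, false_or, or_false,
        List.contains_iff_mem, Bool.or_eq_true, *,
        true_and, false_and, and_true, and_false, or_true, true_or, iff_true, iff_false,
        eq_self_iff_true] <;>
      tauto
  · exact hpair

theorem categorize_item_spec : Claim_equal_categorize_item := by
  intro item _
  show categorize_item item = categorize_item_alt item
  unfold categorize_item categorize_item_alt
  exact pv_main ((PySem.Dict.mk item).getD "matched_topics" [])
    (((PySem.Dict.mk item).getD "matched_keywords" []).map PySem.Str.lower)
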